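-- pv_equiv track=rewrite | github.com/aptend/aoc | 2018/day20/python/detour.py | max_path
-- ===== SOURCE A (Python) =====
-- def max_path(path):
--     """
--     >>> max_path('oo(ooo|o)o')
--     (6, 10)
--     >>> max_path('oo(oo|oo(o|oo)oo|o)o')
--     (9, 20)
--     """
--     candidates = []
--     current_len = 0
--     i = 0
--     while i < len(path):
--         ch = path[i]
--         if ch == '(':
--             max_length, consumed = max_path(path[i+1:])
--             current_len += max_length
--             i += consumed
--         elif ch == '|':
--             candidates.append(current_len)
--             current_len = 0
--         elif ch == ')':
--             candidates.append(current_len)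
--             return max(candidates), i+1
--         else:  # element
--             current_len += 1
--         i += 1
--     candidates.append(current_len)
--     return max(candidates), i
-- ===== SOURCE B (Python) =====
-- def max_path(path):
--     stack = []
--     candidates = []
--     current = 0
--     for i, ch in enumerate(path):
--         if ch == '(':
--             stack.append((candidates, current))
--             candidates = []
--             current = 0
--         elif ch == '|':
--             candidates.append(current)
--             current = 0
--         elif ch == ')':
--             m = max(candidates + [current])
--             if not stack:
--                 return m, i + 1
--             candidates, current = stack.pop()
--             current += m
--         else:
--             current += 1
--     while stack:
--         m = max(candidates + [current])
--         candidates, current = stack.pop()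
--         current += m
--     return max(candidates + [current]), len(path)
-- ===== Notes on version B (the rewrite author's own statement) =====
-- stated objective: faster
-- what changed: Replaced A's recursion that copies the remaining suffix of the string at every group opening with a single left-to-right pass carrying an explicit stack of (candidates, current) frames, so no slices are ever created.
import Mathlib
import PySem

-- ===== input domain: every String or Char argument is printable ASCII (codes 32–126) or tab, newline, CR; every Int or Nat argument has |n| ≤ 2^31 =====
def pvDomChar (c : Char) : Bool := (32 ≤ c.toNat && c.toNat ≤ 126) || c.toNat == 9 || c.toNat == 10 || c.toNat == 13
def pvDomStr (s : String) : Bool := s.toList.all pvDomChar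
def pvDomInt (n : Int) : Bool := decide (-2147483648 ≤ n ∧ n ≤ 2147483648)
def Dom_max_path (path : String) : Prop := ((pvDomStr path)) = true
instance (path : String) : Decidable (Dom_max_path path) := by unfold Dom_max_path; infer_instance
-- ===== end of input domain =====

-- B replaces A's recursive re-slicing parser with a single pass over the characters
-- carrying an explicit stack of (candidates, current) frames; same return value, no slicing.


-- shared helper: Python's max(candidates) on a list known nonempty at every call site
-- (the `0` default is unreachable: both Pythons append before taking the max)
def pyMax (xs : List Int) : Int :=
  match PySem.List.max? xs (fun x => x) with
  | some m => m
  | none => 0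

-- ===== PORT A =====
-- A's while-loop over index i with a recursive call on the slice path[i+1:].
-- Python's i is an int that stays ≥ 0 and the returned `consumed` is always ≥ 0,
-- so both are carried as Nat here (cast to Int at the outer return, as Python returns ints).
def maxPathLoopA : Nat → List Char → List Int → Int → Nat → Int × Nat
  | 0, _path, candidates, current_len, i =>
      -- fuel exhaustion is unreachable: max_path supplies fuel 2·len+1 (see loopA_eq_FA)
      (pyMax (candidates ++ [current_len]), i)
  | fuel+1, path, candidates, current_len, i =>
    if h : i < path.length then
      let ch := path[i]
      if ch = '(' then
        let r := maxPathLoopA fuel (path.drop (i+1)) [] 0 0    -- max_path(path[i+1:])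
        maxPathLoopA fuel path candidates (current_len + r.1) (i + r.2 + 1)
      else if ch = '|' then
        maxPathLoopA fuel path (candidates ++ [current_len]) 0 (i+1)
      else if ch = ')' then
        (pyMax (candidates ++ [current_len]), i+1)
      else
        maxPathLoopA fuel path candidates (current_len + 1) (i+1)
    else
      (pyMax (candidates ++ [current_len]), i)

def max_path (path : String) : Int × Int :=
  let r := maxPathLoopA (path.toList.length + path.toList.length + 1) path.toList [] 0 0
  (r.1, (r.2 : Int))

-- ===== PORT B =====
-- B's end-of-string unwinding of unmatched '(' frames (the final `while stack:` loop)
def unwindAlt (stack : List (List Int × Int)) (candidates : List Int) (current : Int) : Int :=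
  match stack with
  | [] => pyMax (candidates ++ [current])
  | (pc, pcur) :: s => unwindAlt s pc (pcur + pyMax (candidates ++ [current]))

-- B's single `for i, ch in enumerate(path)` loop with an explicit stack
def altLoop (rest : List Char) (i : Nat) (stack : List (List Int × Int))
    (candidates : List Int) (current : Int) : Int × Int :=
  match rest with
  | [] => (unwindAlt stack candidates current, (i : Int))
  | ch :: tail =>
    if ch = '(' then
      altLoop tail (i+1) ((candidates, current) :: stack) [] 0
    else if ch = '|' then
      altLoop tail (i+1) stack (candidates ++ [current]) 0
    else if ch = ')' then
      let m := pyMax (candidates ++ [current])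
      match stack with
      | [] => (m, (i : Int) + 1)
      | (pc, pcur) :: s => altLoop tail (i+1) s pc (pcur + m)
    else
      altLoop tail (i+1) stack candidates (current + 1)

def max_path_alt (path : String) : Int × Int :=
  altLoop path.toList 0 [] [] 0

-- ===== PRECONDITION & SPEC =====
def Spec_max_path (path : String) (out : Int × Int) : Prop := out = max_path_alt path
instance (path : String) (out : Int × Int) : Decidable (Spec_max_path path out) := by unfold Spec_max_path; infer_instance

-- ===== CLAIM (what is proved, stated in full; the proofs are below) =====
def Claim_equal_max_path : Prop := ∀ (path : String), Dom_max_path path → Spec_max_path path (max_path path)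

-- ===== LEMMAS AND PROOFS =====

-- Structural (head-consuming) reformulation of A's loop, used only in the proofs
def FA (p : List Char) (candidates : List Int) (current : Int) : Int × Nat :=
  match p with
  | [] => (pyMax (candidates ++ [current]), 0)
  | ch :: tail =>
    if ch = '(' then
      let r := FA tail [] 0
      let s := FA (tail.drop r.2) candidates (current + r.1)
      (s.1, s.2 + r.2 + 1)
    else if ch = '|' then
      let r := FA tail (candidates ++ [current]) 0
      (r.1, r.2 + 1)
    else if ch = ')' then
      (pyMax (candidates ++ [current]), 1)
    else
      let r := FA tail candidates (current + 1)
      (r.1, r.2 + 1)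
termination_by p.length
decreasing_by
  · simp
  · simp only [List.length_drop, List.length_cons]; omega
  · simp
  · simp


theorem FA_cons (ch : Char) (tail : List Char) (cand : List Int) (cur : Int) :
    FA (ch :: tail) cand cur =
      if ch = '(' then
        ((FA (tail.drop (FA tail [] 0).2) cand (cur + (FA tail [] 0).1)).1,
         (FA (tail.drop (FA tail [] 0).2) cand (cur + (FA tail [] 0).1)).2 + (FA tail [] 0).2 + 1)
      else if ch = '|' then
        ((FA tail (cand ++ [cur]) 0).1, (FA tail (cand ++ [cur]) 0).2 + 1)
      else if ch = ')' then
        (pyMax (cand ++ [cur]), 1)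
      else
        ((FA tail cand (cur + 1)).1, (FA tail cand (cur + 1)).2 + 1) := by
  rw [FA]

theorem loopA_eq_FA : ∀ (fuel : Nat) (p : List Char) (i : Nat) (cand : List Int) (cur : Int),
    p.length + (p.length - i) < fuel →
    maxPathLoopA fuel p cand cur i =
      ((FA (p.drop i) cand cur).1, i + (FA (p.drop i) cand cur).2) := by
  intro fuel
  induction fuel with
  | zero => intro p i cand cur hN; omega
  | succ N ih =>
    intro p i cand cur hN
    by_cases h : i < p.length
    · have hdrop : p.drop i = p[i] :: p.drop (i+1) := List.drop_eq_getElem_cons h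
      rw [maxPathLoopA]
      simp only [h, dif_pos]
      rw [hdrop, FA_cons]
      by_cases hpar : p[i] = '('
      · simp only [if_pos hpar]
        have hr : maxPathLoopA N (p.drop (i+1)) [] 0 0 =
            ((FA ((p.drop (i+1)).drop 0) [] 0).1, 0 + (FA ((p.drop (i+1)).drop 0) [] 0).2) := by
          apply ih
          simp only [List.length_drop, Nat.sub_zero]
          omega
        simp only [List.drop_zero, Nat.zero_add] at hr
        rw [hr]
        have hcont : maxPathLoopA N p cand (cur + (FA (p.drop (i+1)) [] 0).1)
              (i + (FA (p.drop (i+1)) [] 0).2 + 1) =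
            ((FA (p.drop (i + (FA (p.drop (i+1)) [] 0).2 + 1)) cand (cur + (FA (p.drop (i+1)) [] 0).1)).1,
             (i + (FA (p.drop (i+1)) [] 0).2 + 1) +
               (FA (p.drop (i + (FA (p.drop (i+1)) [] 0).2 + 1)) cand (cur + (FA (p.drop (i+1)) [] 0).1)).2) := by
          apply ih
          omega
        rw [hcont]
        have hdd : (p.drop (i+1)).drop (FA (p.drop (i+1)) [] 0).2 =
            p.drop (i + (FA (p.drop (i+1)) [] 0).2 + 1) := by
          rw [List.drop_drop]
          ring_nf
        rw [hdd]
        simp only [Prod.mk.injEq]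
        exact ⟨by trivial, by omega⟩
      · by_cases hbar : p[i] = '|'
        · simp only [if_neg hpar, if_pos hbar]
          have := ih p (i+1) (cand ++ [cur]) 0 (by omega)
          rw [this]
          simp only [Prod.mk.injEq]
          exact ⟨by trivial, by omega⟩
        · by_cases hcl : p[i] = ')'
          · simp only [if_neg hpar, if_neg hbar, if_pos hcl]
          · simp only [if_neg hpar, if_neg hbar, if_neg hcl]
            have := ih p (i+1) cand (cur + 1) (by omega)
            rw [this]
            simp only [Prod.mk.injEq]
            exact ⟨by trivial, by omega⟩
    · have hdrop : p.drop i = [] := List.drop_eq_nil_of_le (by omega)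
      rw [maxPathLoopA]
      simp [h, hdrop, FA]

-- A's computation resumed through a stack of pending frames (proof-side semantics of B's stack)
def Ares (stack : List (List Int × Int)) (rest : List Char) (i : Nat)
    (cand : List Int) (cur : Int) : Int × Int :=
  match stack with
  | [] => ((FA rest cand cur).1, ((i + (FA rest cand cur).2 : Nat) : Int))
  | (pc, pcur) :: s =>
    let r := FA rest cand cur
    Ares s (rest.drop r.2) (i + r.2) pc (pcur + r.1)

theorem Ares_nil_rest : ∀ (stack : List (List Int × Int)) (i : Nat) (cand : List Int) (cur : Int),
    Ares stack [] i cand cur = (unwindAlt stack cand cur, (i : Int)) := by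
  intro stack
  induction stack with
  | nil => intro i cand cur; simp [Ares, FA, unwindAlt]
  | cons hd s ih =>
    intro i cand cur
    obtain ⟨pc, pcur⟩ := hd
    simp only [Ares, FA, unwindAlt, List.drop_nil, Nat.add_zero]
    exact ih i pc (pcur + pyMax (cand ++ [cur]))

theorem Ares_paren (stack : List (List Int × Int)) (tail : List Char) (i : Nat)
    (cand : List Int) (cur : Int) :
    Ares stack ('(' :: tail) i cand cur = Ares (((cand, cur)) :: stack) tail (i+1) [] 0 := by
  cases stack with
  | nil =>
    simp only [Ares, FA_cons, if_pos]
    simp only [Prod.mk.injEq]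
    exact ⟨by trivial, by push_cast; ring⟩
  | cons hd s =>
    obtain ⟨pc, pcur⟩ := hd
    simp only [Ares, FA_cons, if_pos]
    have h1 : ('(' :: tail).drop
        ((FA (tail.drop (FA tail [] 0).2) cand (cur + (FA tail [] 0).1)).2 + (FA tail [] 0).2 + 1) =
        (tail.drop (FA tail [] 0).2).drop
          (FA (tail.drop (FA tail [] 0).2) cand (cur + (FA tail [] 0).1)).2 := by
      simp only [List.drop_succ_cons, List.drop_drop]
      ring_nf
    rw [h1]
    congr 1
    omega

theorem Ares_bar (stack : List (List Int × Int)) (tail : List Char) (i : Nat)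
    (cand : List Int) (cur : Int) :
    Ares stack ('|' :: tail) i cand cur = Ares stack tail (i+1) (cand ++ [cur]) 0 := by
  cases stack with
  | nil =>
    simp only [Ares, FA_cons, if_neg (show ¬ ('|' : Char) = '(' by decide), if_pos]
    simp only [Prod.mk.injEq]
    exact ⟨by trivial, by push_cast; ring⟩
  | cons hd s =>
    obtain ⟨pc, pcur⟩ := hd
    simp only [Ares, FA_cons, if_neg (show ¬ ('|' : Char) = '(' by decide), if_pos]
    simp only [List.drop_succ_cons]
    congr 1
    omega

theorem Ares_elem (stack : List (List Int × Int)) (ch : Char) (tail : List Char) (i : Nat)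
    (cand : List Int) (cur : Int) (h1 : ¬ ch = '(') (h2 : ¬ ch = '|') (h3 : ¬ ch = ')') :
    Ares stack (ch :: tail) i cand cur = Ares stack tail (i+1) cand (cur + 1) := by
  cases stack with
  | nil =>
    simp only [Ares, FA_cons, h1, h2, h3, if_false]
    simp only [Prod.mk.injEq]
    exact ⟨by trivial, by push_cast; ring⟩
  | cons hd s =>
    obtain ⟨pc, pcur⟩ := hd
    simp only [Ares, FA_cons, h1, h2, h3, if_false]
    simp only [List.drop_succ_cons]
    congr 1
    omega

theorem altLoop_eq_Ares : ∀ (rest : List Char) (i : Nat) (stack : List (List Int × Int))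
    (cand : List Int) (cur : Int),
    altLoop rest i stack cand cur = Ares stack rest i cand cur := by
  intro rest
  induction rest with
  | nil =>
    intro i stack cand cur
    rw [altLoop, Ares_nil_rest]
  | cons ch tail ih =>
    intro i stack cand cur
    rw [altLoop]
    by_cases h1 : ch = '('
    · subst h1
      rw [if_pos rfl, ih, Ares_paren]
    · by_cases h2 : ch = '|'
      · subst h2
        rw [if_neg h1, if_pos rfl, ih, Ares_bar]
      · by_cases h3 : ch = ')'
        · subst h3
          rw [if_neg h1, if_neg h2, if_pos rfl]
          cases stack with
          | nil =>
            simp only [Ares, FA_cons, if_neg (show ¬ (')' : Char) = '(' by decide),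
              if_neg (show ¬ (')' : Char) = '|' by decide), if_pos]
            simp only [Prod.mk.injEq]
            exact ⟨by trivial, by push_cast; ring⟩
          | cons hd s =>
            obtain ⟨pc, pcur⟩ := hd
            simp only [Ares, FA_cons, if_neg (show ¬ (')' : Char) = '(' by decide),
              if_neg (show ¬ (')' : Char) = '|' by decide), if_pos]
            simp only [List.drop_succ_cons, List.drop_zero]
            rw [ih]
        · rw [if_neg h1, if_neg h2, if_neg h3, ih,
            Ares_elem stack ch tail i cand cur h1 h2 h3]

-- ===== VERDICT (by name: the statement is the Claim_ definition above) =====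
theorem max_path_spec : Claim_equal_max_path := by
  intro path _
  unfold Spec_max_path max_path max_path_alt
  rw [altLoop_eq_Ares]
  have hA := loopA_eq_FA (path.toList.length + path.toList.length + 1) path.toList 0 [] 0 (by omega)
  simp only [List.drop_zero] at hA
  rw [hA]
  simp [Ares]
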